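/- GENERATED by farm/mkstatement.py from design/units.tsv (unit `vorbis_deinit.4`) and the assertions of Vorbis/Spec/Alloc.lean — do not edit.
   THE STATEMENT of the proof unit `vorbis_deinit.4`: segment 4 of `vorbis_deinit` (6 instructions; entries 0x107a54;
   exits ret; ranges 0x107a54-0x107a5c)
   takes each of its entry assertions to one of its exit assertions (`Vorbis.Spec.vorbis_deinit.Seg4`), given the contracts of its callees.
   What the names mean: Vorbis/Spec/Basic.lean (the shared hypotheses), Vorbis/Spec/Alloc.lean (the assertions). The theorem to prove:
   `theorem vorbis_deinit_4_ok : Vorbis.Spec.vorbis_deinit_4.Statement`. -/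
import Vorbis.Spec.Alloc
namespace Vorbis.Spec.vorbis_deinit_4
open X86 X86.User Asan

/-- The statement of unit `vorbis_deinit.4`. -/
def Statement : Prop :=
  ∀ (Lay : Layout) (_hLay : Lay.hi = 0x1000000) (μ : Microarch) (_hμ : UserX.MicroOK μ) (u₀ : State)
    (_hcode : HasCodeNat Lay u₀ Vorbis.L.vorbis_deinit.entry Vorbis.Code.code_vorbis_deinit.nat Vorbis.L.vorbis_deinit.size),
    Vorbis.Spec.vorbis_deinit.Seg4 Lay μ u₀

end Vorbis.Spec.vorbis_deinit_4
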